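-- pv_equiv track=rewrite | github.com/neochen1991/multi-agent-cli | backend/app/services/log_analysis/trace_alignment.py | build_propagation_chain
-- ===== SOURCE A (Python) =====
-- from typing import Any, Dict, List
--
-- def build_propagation_chain(trace_timeline: List[Dict[str, Any]]) -> List[Dict[str, Any]]:
--     chain: List[Dict[str, Any]] = []
--     for item in trace_timeline:
--         message = str(item.get("message") or "").lower()
--         source = str(item.get("source") or "")
--         stage = ""
--         if source == "log" and ("uri=" in message or "/api/" in message):
--             stage = "request_entry"
--         elif "transaction" in message or "createorder" in message or source == "trace":
--             stage = "application_processing"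
--         elif any(token in message for token in ("hikari", "connection", "lock", "pool")):
--             stage = "resource_contention"
--         elif any(token in message for token in ("502", "timeout", "5xx", "upstream")):
--             stage = "user_visible_failure"
--         if not stage:
--             continue
--         chain.append(
--             {
--                 "stage": stage,
--                 "timestamp": str(item.get("timestamp") or ""),
--                 "service": str(item.get("service") or ""),
--                 "component": str(item.get("component") or ""),
--                 "message": str(item.get("message") or "")[:220],
--                 "source": source,
--             }
--         )
--     deduped: List[Dict[str, Any]] = []
--     seen = set()
--     for item in chain:
--         key = f"{item.get('stage')}|{item.get('component')}|{item.get('timestamp')}"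
--         if key in seen:
--             continue
--         seen.add(key)
--         deduped.append(item)
--     return deduped[:10]
-- ===== SOURCE B (Python) =====
-- from typing import Any, Dict, List
--
--
-- def _field(item: Dict[str, Any], key: str) -> str:
--     return str(item.get(key) or "")
--
--
-- def _stage(item: Dict[str, Any]) -> str:
--     message = _field(item, "message").lower()
--     source = _field(item, "source")
--     if source == "log" and ("uri=" in message or "/api/" in message):
--         return "request_entry"
--     if "transaction" in message or "createorder" in message or source == "trace":
--         return "application_processing"
--     if any(token in message for token in ("hikari", "connection", "lock", "pool")):
--         return "resource_contention"
--     if any(token in message for token in ("502", "timeout", "5xx", "upstream")):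
--         return "user_visible_failure"
--     return ""
--
--
-- def _entry(item: Dict[str, Any], stage: str) -> Dict[str, Any]:
--     return {
--         "stage": stage,
--         "timestamp": _field(item, "timestamp"),
--         "service": _field(item, "service"),
--         "component": _field(item, "component"),
--         "message": _field(item, "message")[:220],
--         "source": _field(item, "source"),
--     }
--
--
-- def build_propagation_chain(trace_timeline: List[Dict[str, Any]]) -> List[Dict[str, Any]]:
--     result: List[Dict[str, Any]] = []
--     seen = set()
--     for item in trace_timeline:
--         if len(result) == 10:
--             break
--         stage = _stage(item)
--         if not stage:
--             continue
--         key = f"{stage}|{_field(item, 'component')}|{_field(item, 'timestamp')}"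
--         if key in seen:
--             continue
--         seen.add(key)
--         result.append(_entry(item, stage))
--     return result
-- ===== Notes on version B (the rewrite author's own statement) =====
-- stated objective: alternative
-- what changed: Fused A's two passes (build a full chain list, then a separate dedup pass, then [:10]) into one loop that classifies, dedups by key on the fly, and stops as soon as 10 unique entries are collected, so the intermediate chain list disappears.
import Mathlib
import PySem

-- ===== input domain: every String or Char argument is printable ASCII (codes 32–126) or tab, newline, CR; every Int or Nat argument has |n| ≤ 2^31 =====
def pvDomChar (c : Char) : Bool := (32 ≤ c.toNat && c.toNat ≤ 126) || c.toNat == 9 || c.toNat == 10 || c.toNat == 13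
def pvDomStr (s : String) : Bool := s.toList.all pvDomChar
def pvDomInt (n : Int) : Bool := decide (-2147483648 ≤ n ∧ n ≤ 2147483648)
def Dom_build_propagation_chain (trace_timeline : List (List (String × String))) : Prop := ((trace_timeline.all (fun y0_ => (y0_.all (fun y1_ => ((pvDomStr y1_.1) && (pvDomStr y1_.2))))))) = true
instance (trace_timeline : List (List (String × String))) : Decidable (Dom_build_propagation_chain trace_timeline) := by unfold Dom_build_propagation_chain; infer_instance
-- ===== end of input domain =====

-- B fuses A's two passes (classify into a chain list, then dedup, then [:10]) into one
-- loop that classifies, dedups and stops at 10 unique entries; return values are equal.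

-- ===== PORT A =====
-- f"{o}" for an Optional[str] o (the dedup keys; always present on chain items)
def pvFmt (o : Option String) : String := match o with | some s => s | none => "None"

-- body of A's first loop: classify, append the projected dict when a stage results
def aStep (acc : List (List (String × String))) (item : List (String × String)) :
    List (List (String × String)) :=
  let message := PySem.Str.lower (((PySem.Dict.mk item).get? "message").getD "")
  let source := ((PySem.Dict.mk item).get? "source").getD ""
  let stage :=
    if source == "log" && (PySem.Str.isIn "uri=" message || PySem.Str.isIn "/api/" message) then
      "request_entry"
    else if PySem.Str.isIn "transaction" message || PySem.Str.isIn "createorder" message || source == "trace" then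
      "application_processing"
    else if PySem.Str.isIn "hikari" message || PySem.Str.isIn "connection" message ||
            PySem.Str.isIn "lock" message || PySem.Str.isIn "pool" message then
      "resource_contention"
    else if PySem.Str.isIn "502" message || PySem.Str.isIn "timeout" message ||
            PySem.Str.isIn "5xx" message || PySem.Str.isIn "upstream" message then
      "user_visible_failure"
    else ""
  if stage == "" then acc
  else acc ++ [[("stage", stage),
                ("timestamp", ((PySem.Dict.mk item).get? "timestamp").getD ""),
                ("service", ((PySem.Dict.mk item).get? "service").getD ""),
                ("component", ((PySem.Dict.mk item).get? "component").getD ""),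
                ("message", PySem.Str.slice (((PySem.Dict.mk item).get? "message").getD "") none (some 220)),
                ("source", source)]]

-- body of A's second loop: dedup by "stage|component|timestamp", first occurrence kept
def aDedupStep (st : PySem.Set String × List (List (String × String)))
    (it : List (String × String)) : PySem.Set String × List (List (String × String)) :=
  let key := pvFmt ((PySem.Dict.mk it).get? "stage") ++ "|" ++
             pvFmt ((PySem.Dict.mk it).get? "component") ++ "|" ++
             pvFmt ((PySem.Dict.mk it).get? "timestamp")
  if PySem.Set.contains st.1 key then st
  else (PySem.Set.add st.1 key, st.2 ++ [it])

def build_propagation_chain (trace_timeline : List (List (String × String))) : List (List (String × String)) :=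
  let chain := trace_timeline.foldl aStep []
  let deduped := (chain.foldl aDedupStep (PySem.Set.empty, [])).2
  PySem.List.slice deduped none (some 10)

-- ===== PORT B =====
def bField (item : List (String × String)) (key : String) : String :=
  ((PySem.Dict.mk item).get? key).getD ""

def bStage (item : List (String × String)) : String :=
  let message := PySem.Str.lower (bField item "message")
  let source := bField item "source"
  if source == "log" && (PySem.Str.isIn "uri=" message || PySem.Str.isIn "/api/" message) then
    "request_entry"
  else if PySem.Str.isIn "transaction" message || PySem.Str.isIn "createorder" message || source == "trace" then
    "application_processing"
  else if PySem.Str.isIn "hikari" message || PySem.Str.isIn "connection" message ||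
          PySem.Str.isIn "lock" message || PySem.Str.isIn "pool" message then
    "resource_contention"
  else if PySem.Str.isIn "502" message || PySem.Str.isIn "timeout" message ||
          PySem.Str.isIn "5xx" message || PySem.Str.isIn "upstream" message then
    "user_visible_failure"
  else ""

def bEntry (item : List (String × String)) (stage : String) : List (String × String) :=
  [("stage", stage),
   ("timestamp", bField item "timestamp"),
   ("service", bField item "service"),
   ("component", bField item "component"),
   ("message", PySem.Str.slice (bField item "message") none (some 220)),
   ("source", bField item "source")]

-- the fused loop: classify, dedup on the fly, break at 10 collected entries
def bGo (seen : PySem.Set String) (result : List (List (String × String))) :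
    List (List (String × String)) → List (List (String × String))
  | [] => result
  | item :: rest =>
    if result.length == 10 then result
    else
      let stage := bStage item
      if stage == "" then bGo seen result rest
      else
        let key := stage ++ "|" ++ bField item "component" ++ "|" ++ bField item "timestamp"
        if PySem.Set.contains seen key then bGo seen result rest
        else bGo (PySem.Set.add seen key) (result ++ [bEntry item stage]) rest

def build_propagation_chain_alt (trace_timeline : List (List (String × String))) : List (List (String × String)) :=
  bGo PySem.Set.empty [] trace_timeline

-- ===== PRECONDITION & SPEC =====
def Spec_build_propagation_chain (trace_timeline : List (List (String × String))) (out : List (List (String × String))) : Prop := out = build_propagation_chain_alt trace_timeline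
instance (trace_timeline : List (List (String × String))) (out : List (List (String × String))) : Decidable (Spec_build_propagation_chain trace_timeline out) := by unfold Spec_build_propagation_chain; infer_instance

-- ===== CLAIM (what is proved, stated in full; the proofs are below) =====
def Claim_equal_build_propagation_chain : Prop := ∀ (trace_timeline : List (List (String × String))), Dom_build_propagation_chain trace_timeline → Spec_build_propagation_chain trace_timeline (build_propagation_chain trace_timeline)

-- ===== LEMMAS AND PROOFS =====

-- proof-side names for A's pieces
def akey (it : List (String × String)) : String :=
  pvFmt ((PySem.Dict.mk it).get? "stage") ++ "|" ++
  pvFmt ((PySem.Dict.mk it).get? "component") ++ "|" ++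
  pvFmt ((PySem.Dict.mk it).get? "timestamp")

def projOf (item : List (String × String)) : Option (List (String × String)) :=
  if bStage item == "" then none else some (bEntry item (bStage item))

-- A's dedup pass written as a plain recursion over the chain list
def dd (seen : PySem.Set String) (res : List (List (String × String))) :
    List (List (String × String)) → List (List (String × String))
  | [] => res
  | e :: es =>
    if PySem.Set.contains seen (akey e) then dd seen res es
    else dd (PySem.Set.add seen (akey e)) (res ++ [e]) es

theorem aStep_eq (acc : List (List (String × String))) (item : List (String × String)) :
    aStep acc item = if bStage item == "" then acc else acc ++ [bEntry item (bStage item)] := rfl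

theorem aDedupStep_eq (st : PySem.Set String × List (List (String × String)))
    (it : List (String × String)) :
    aDedupStep st it =
      if PySem.Set.contains st.1 (akey it) then st
      else (PySem.Set.add st.1 (akey it), st.2 ++ [it]) := rfl

theorem akey_entry (item : List (String × String)) (stage : String) :
    akey (bEntry item stage) =
      stage ++ "|" ++ bField item "component" ++ "|" ++ bField item "timestamp" := by
  simp [akey, bEntry, PySem.Dict.get?_mk_cons, pvFmt]

theorem chain_eq_filterMap (tl : List (List (String × String)))
    (acc : List (List (String × String))) :
    tl.foldl aStep acc = acc ++ tl.filterMap projOf := by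
  induction tl generalizing acc with
  | nil => simp
  | cons item rest ih =>
    rw [List.foldl_cons, aStep_eq]
    by_cases h : bStage item = "" <;> simp [projOf, h, ih]

theorem dedup_eq_dd (l : List (List (String × String)))
    (st : PySem.Set String × List (List (String × String))) :
    (l.foldl aDedupStep st).2 = dd st.1 st.2 l := by
  induction l generalizing st with
  | nil => simp [dd]
  | cons e es ih =>
    rw [List.foldl_cons, aDedupStep_eq]
    by_cases h : akey e ∈ st.1
    · simp only [dd]
      simp [h, ih]
    · simp only [dd]
      simpa [h] using ih (PySem.Set.add st.1 (akey e), st.2 ++ [e])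

theorem dd_append (l : List (List (String × String))) (seen : PySem.Set String)
    (a b : List (List (String × String))) :
    dd seen (a ++ b) l = a ++ dd seen b l := by
  induction l generalizing seen b with
  | nil => simp [dd]
  | cons e es ih =>
    simp only [dd]
    by_cases h : akey e ∈ seen
    · simp [h, ih]
    · simpa [h, List.append_assoc] using ih (PySem.Set.add seen (akey e)) (b ++ [e])

theorem dd_take_eq_bGo (tl : List (List (String × String))) (seen : PySem.Set String)
    (res : List (List (String × String))) (hres : res.length ≤ 10) :
    (dd seen res (tl.filterMap projOf)).take 10 = bGo seen res tl := by
  induction tl generalizing seen res with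
  | nil => simpa [dd, bGo] using List.take_of_length_le hres
  | cons item rest ih =>
    by_cases h10 : res.length = 10
    · have hfull : ∀ l, (dd seen res l).take 10 = res := by
        intro l
        have hsplit := dd_append l seen res []
        simp only [List.append_nil] at hsplit
        rw [hsplit, ← h10, List.take_left]
      rw [bGo]
      simp [h10, hfull]
    · have hlt : res.length < 10 := lt_of_le_of_ne hres h10
      rw [bGo]
      simp only [show (res.length == 10) = false from by simp [h10], Bool.false_eq_true,
        if_false]
      by_cases hs : bStage item == ""
      · have hp : projOf item = none := by simp [projOf, hs]
        simpa [hp, hs] using ih seen res hres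
      · have hp : projOf item = some (bEntry item (bStage item)) := by simp [projOf, hs]
        simp only [List.filterMap_cons, hp, hs, Bool.false_eq_true, if_false]
        rw [dd, akey_entry]
        by_cases hk : (bStage item ++ "|" ++ bField item "component" ++ "|" ++ bField item "timestamp") ∈ seen
        · simpa [hk] using ih seen res hres
        · simpa [hk] using
            ih (PySem.Set.add seen (bStage item ++ "|" ++ bField item "component" ++ "|" ++ bField item "timestamp"))
               (res ++ [bEntry item (bStage item)]) (by simpa using hlt)

-- ===== VERDICT (by name: the statement is the Claim_ definition above) =====
theorem build_propagation_chain_spec : Claim_equal_build_propagation_chain := by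
  intro tl _
  show build_propagation_chain tl = build_propagation_chain_alt tl
  have h1 : build_propagation_chain tl =
      PySem.List.slice (((tl.foldl aStep []).foldl aDedupStep (PySem.Set.empty, [])).2)
        none (some 10) := rfl
  rw [h1, chain_eq_filterMap tl [], List.nil_append, dedup_eq_dd,
    PySem.List.slice_to _ (by norm_num)]
  show (dd PySem.Set.empty [] (tl.filterMap projOf)).take (10 : Int).toNat
      = build_propagation_chain_alt tl
  norm_num
  exact dd_take_eq_bGo tl PySem.Set.empty [] (by simp)
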